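-- pv_equiv track=rewrite | github.com/ReZerVV/DSA | dynamic_programming/main.py | min_split
-- ===== SOURCE A (Python) =====
-- def min_split(s, parts):
--     n = len(s)
--     parts = [0] + parts + [n]
--     m = len(parts)
--     dp = [[0]*m for _ in range(m)]
--     for l in range(2, m):
--         for i in range(m - l):
--             j = i + l
--             dp[i][j] = float('inf')
--             for k in range(i+1, j):
--                 dp[i][j] = min(dp[i][j], dp[i][k] + dp[k][j] + parts[j]-parts[i])
--     return dp[0][-1]
-- ===== SOURCE B (Python) =====
-- def min_split(s, parts):
--     p = [0] + parts + [len(s)]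
--     m = len(p)
--     memo = {}
--     def f(i, j):
--         v = memo.get((i, j))
--         if v is not None:
--             return v
--         best = None
--         for k in range(i + 1, j):
--             a = 0 if k - i < 2 else memo.get((i, k))
--             if a is None:
--                 a = f(i, k)
--             b = 0 if j - k < 2 else memo.get((k, j))
--             if b is None:
--                 b = f(k, j)
--             c = a + b
--             if best is None or c < best:
--                 best = c
--         best += p[j] - p[i]
--         memo[(i, j)] = best
--         return best
--     if m - 1 < 2:
--         return 0
--     return f(0, m - 1)
-- ===== Notes on version B (the rewrite author's own statement) =====
-- stated objective: alternative
-- what changed: A fills an m x m table bottom-up with a triple nested loop over interval widths; B computes the same interval recurrence top-down by a memoized recursion over (i, j) intervals with a memo dictionary, reading already-solved subintervals out of the dict inside the k-loop.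
import Mathlib
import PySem

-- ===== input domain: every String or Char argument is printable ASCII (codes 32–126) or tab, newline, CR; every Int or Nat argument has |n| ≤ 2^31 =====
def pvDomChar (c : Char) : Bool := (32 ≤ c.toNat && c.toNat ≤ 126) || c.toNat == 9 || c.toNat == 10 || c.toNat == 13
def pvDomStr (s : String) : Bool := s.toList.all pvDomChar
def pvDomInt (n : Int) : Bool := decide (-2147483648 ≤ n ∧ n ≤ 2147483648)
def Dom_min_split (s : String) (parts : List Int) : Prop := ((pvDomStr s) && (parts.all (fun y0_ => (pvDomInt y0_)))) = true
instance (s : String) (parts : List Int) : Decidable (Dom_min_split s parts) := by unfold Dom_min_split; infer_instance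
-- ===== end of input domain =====

-- B replaces A's bottom-up triple loop over a 2D list table by a top-down memoized
-- recursion over intervals (objective: alternative decomposition, same asymptotic cost).

-- ===== PORT A =====
-- dp[i][j] read / write on the 2D list table
def pvGet2 (dp : List (List Int)) (i j : Nat) : Int := (dp.getD i []).getD j 0
def pvSet2 (dp : List (List Int)) (i j : Nat) (v : Int) : List (List Int) :=
  dp.set i ((dp.getD i []).set j v)
-- running-min accumulator of the k-loop; 'none' models the float('inf') seed — exact
-- here because the k-loop is nonempty (l ≥ 2), so the value stored is always an int
def pvOMin (b : Option Int) (c : Int) : Option Int :=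
  some (match b with | none => c | some v => min v c)

-- body of A's 'for i in range(m - l)' loop (j = i + l; the k-loop; dp[i][j] = best)
def pvInner (p : List Int) (l : Nat) (dp : List (List Int)) (i : Nat) : List (List Int) :=
  let j := i + l
  let best : Option Int := (List.range' (i+1) (j - (i+1))).foldl
    (fun b k => pvOMin b (pvGet2 dp i k + pvGet2 dp k j + p.getD j 0 - p.getD i 0)) none
  pvSet2 dp i j (best.getD 0)

-- body of A's 'for l in range(2, m)' loop
def pvOuter (p : List Int) (dp : List (List Int)) (l : Nat) : List (List Int) :=
  (List.range (p.length - l)).foldl (pvInner p l) dp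

def min_split (s : String) (parts : List Int) : Int :=
  let n : Int := PySem.Str.len s
  let p : List Int := 0 :: (parts ++ [n])       -- parts = [0] + parts + [n]
  let m : Nat := p.length
  let dp0 : List (List Int) := List.replicate m (List.replicate m 0)
  let dp := (List.range' 2 (m - 2)).foldl (pvOuter p) dp0
  pvGet2 dp 0 (m - 1)      -- dp[0][-1]: row 0 has length m ≥ 2, so index -1 is m - 1

-- ===== PORT B =====
-- best-so-far update: 'if best is None or c < best: best = c'
def pvBMin (b : Option Int) (c : Int) : Option Int :=
  match b with | none => some c | some v => if c < v then some c else some v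

-- f(i, j), memo dict threaded through; callers guarantee j - i >= 2; fuel is a
-- termination device only (callers keep j - i <= fuel, the fuel-0 fallback is dead)
def pvFB (p : List Int) : Nat → Nat → Nat → PySem.Dict (Nat × Nat) Int → Int × PySem.Dict (Nat × Nat) Int
  | fuel, i, j, memo =>
    match PySem.Dict.get? memo (i, j) with
    | some v => (v, memo)
    | none =>
      match fuel with
      | 0 => (0, memo)
      | fuel' + 1 =>
        let r := (List.range' (i+1) (j - (i+1))).foldl
          (fun (acc : Option Int × PySem.Dict (Nat × Nat) Int) k =>
            let ra : Int × PySem.Dict (Nat × Nat) Int :=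
              if k - i < 2 then (0, acc.2)
              else match PySem.Dict.get? acc.2 (i, k) with
                   | some a => (a, acc.2)
                   | none => pvFB p fuel' i k acc.2
            let rb : Int × PySem.Dict (Nat × Nat) Int :=
              if j - k < 2 then (0, ra.2)
              else match PySem.Dict.get? ra.2 (k, j) with
                   | some b => (b, ra.2)
                   | none => pvFB p fuel' k j ra.2
            (pvBMin acc.1 (ra.1 + rb.1), rb.2))
          (none, memo)
        let best := r.1.getD 0 + p.getD j 0 - p.getD i 0
        (best, PySem.Dict.insert r.2 (i, j) best)

def min_split_alt (s : String) (parts : List Int) : Int :=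
  let p : List Int := 0 :: (parts ++ [PySem.Str.len s])
  let m : Nat := p.length
  if m - 1 < 2 then 0 else (pvFB p (m - 1) 0 (m - 1) PySem.Dict.empty).1

-- ===== PRECONDITION & SPEC =====
def Spec_min_split (s : String) (parts : List Int) (out : Int) : Prop := out = min_split_alt s parts
instance (s : String) (parts : List Int) (out : Int) : Decidable (Spec_min_split s parts out) := by unfold Spec_min_split; infer_instance

-- ===== CLAIM (what is proved, stated in full; the proofs are below) =====
def Claim_equal_min_split : Prop := ∀ (s : String) (parts : List Int), Dom_min_split s parts → Spec_min_split s parts (min_split s parts)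

-- ===== LEMMAS AND PROOFS =====

-- the common specification: the interval-splitting recurrence, driven by fuel
def pvF (p : List Int) : Nat → Nat → Nat → Int
  | 0, _, _ => 0
  | fuel + 1, i, j =>
    if j < i + 2 then 0
    else ((List.range' (i+1) (j - (i+1))).foldl
        (fun b k => pvOMin b (pvF p fuel i k + pvF p fuel k j)) none).getD 0
      + p.getD j 0 - p.getD i 0

theorem pvF_zero (p : List Int) (f i j : Nat) (h : j < i + 2) : pvF p f i j = 0 := by
  cases f with
  | zero => rfl
  | succ f => simp [pvF, h]

theorem pvF_fuel (p : List Int) (f1 f2 i j : Nat) (h1 : j ≤ i + f1) (h2 : j ≤ i + f2) :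
    pvF p f1 i j = pvF p f2 i j := by
  induction f1 generalizing f2 i j with
  | zero => rw [pvF_zero p 0 i j (by omega), pvF_zero p f2 i j (by omega)]
  | succ f1 ih =>
    cases f2 with
    | zero => rw [pvF_zero p _ i j (by omega), pvF_zero p 0 i j (by omega)]
    | succ f2 =>
      by_cases hij : j < i + 2
      · rw [pvF_zero p _ i j hij, pvF_zero p _ i j hij]
      · simp only [pvF, if_neg hij]
        have hfold : (List.range' (i+1) (j - (i+1))).foldl
            (fun b k => pvOMin b (pvF p f1 i k + pvF p f1 k j)) none
            = (List.range' (i+1) (j - (i+1))).foldl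
            (fun b k => pvOMin b (pvF p f2 i k + pvF p f2 k j)) none := by
          apply PySem.List.foldl_congr_mem
          intro acc k hk
          obtain ⟨hk1, hk2⟩ := List.mem_range'_1.mp hk
          rw [ih f2 i k (by omega) (by omega), ih f2 k j (by omega) (by omega)]
        rw [hfold]

-- running-min fold facts
theorem pvOMin_foldl_some (l : List Nat) (g : Nat → Int) (v : Int) :
    ∃ u, l.foldl (fun b k => pvOMin b (g k)) (some v) = some u := by
  induction l generalizing v with
  | nil => exact ⟨v, rfl⟩
  | cons k ks ih => simpa [pvOMin] using ih (min v (g k))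

theorem pvOMin_cons_some (k : Nat) (ks : List Nat) (g : Nat → Int) :
    ∃ u, (k :: ks).foldl (fun b k => pvOMin b (g k)) none = some u := by
  simpa [pvOMin] using pvOMin_foldl_some ks g (g k)

theorem pvOMin_add (l : List Nat) (g : Nat → Int) (w : Int) (b : Option Int) :
    l.foldl (fun b k => pvOMin b (g k + w)) (Option.map (· + w) b)
      = Option.map (· + w) (l.foldl (fun b k => pvOMin b (g k)) b) := by
  induction l generalizing b with
  | nil => rfl
  | cons k ks ih =>
    have hstep : pvOMin (Option.map (· + w) b) (g k + w) = Option.map (· + w) (pvOMin b (g k)) := by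
      cases b with
      | none => rfl
      | some v => simp [pvOMin, min_add_add_right]
    simp only [List.foldl_cons, hstep, ih]

-- ===== B-side: memoization is sound =====
def pvGood (p : List Int) (d : PySem.Dict (Nat × Nat) Int) : Prop :=
  ∀ i j v, d.get? (i, j) = some v → v = pvF p (j - i) i j

theorem pvGood_empty (p : List Int) : pvGood p PySem.Dict.empty := by
  intro i j v h
  simp [PySem.Dict.get?_empty] at h

theorem pvBMin_eq_pvOMin (b : Option Int) (c : Int) : pvBMin b c = pvOMin b c := by
  cases b with
  | none => rfl
  | some v =>
    simp only [pvBMin, pvOMin]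
    split_ifs with h <;> simp [min_def] <;> omega

theorem pvFB_spec (p : List Int) : ∀ (fuel i j : Nat) (memo : PySem.Dict (Nat × Nat) Int),
    i + 2 ≤ j → j ≤ i + fuel → pvGood p memo →
    (pvFB p fuel i j memo).1 = pvF p (j - i) i j ∧ pvGood p (pvFB p fuel i j memo).2 := by
  intro fuel
  induction fuel with
  | zero => intro i j memo hij hle _; omega
  | succ fuel ih =>
    intro i j memo hij hle hgood
    rw [pvFB.eq_def]
    simp only []
    cases hmem : PySem.Dict.get? memo (i, j) with
    | some v => exact ⟨hgood i j v hmem, hgood⟩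
    | none =>
      simp only []
      -- the fold over k, with the memo threaded through
      have hfold : ∀ (l : List Nat), (∀ k ∈ l, i + 1 ≤ k ∧ k < j) →
          ∀ (b : Option Int) (d : PySem.Dict (Nat × Nat) Int), pvGood p d →
          (l.foldl (fun (acc : Option Int × PySem.Dict (Nat × Nat) Int) k =>
              let ra : Int × PySem.Dict (Nat × Nat) Int :=
                if k - i < 2 then (0, acc.2)
                else match PySem.Dict.get? acc.2 (i, k) with
                     | some a => (a, acc.2)
                     | none => pvFB p fuel i k acc.2
              let rb : Int × PySem.Dict (Nat × Nat) Int :=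
                if j - k < 2 then (0, ra.2)
                else match PySem.Dict.get? ra.2 (k, j) with
                     | some b => (b, ra.2)
                     | none => pvFB p fuel k j ra.2
              (pvBMin acc.1 (ra.1 + rb.1), rb.2)) (b, d)).1
            = l.foldl (fun b k => pvOMin b (pvF p fuel i k + pvF p fuel k j)) b
          ∧ pvGood p (l.foldl (fun (acc : Option Int × PySem.Dict (Nat × Nat) Int) k =>
              let ra : Int × PySem.Dict (Nat × Nat) Int :=
                if k - i < 2 then (0, acc.2)
                else match PySem.Dict.get? acc.2 (i, k) with
                     | some a => (a, acc.2)
                     | none => pvFB p fuel i k acc.2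
              let rb : Int × PySem.Dict (Nat × Nat) Int :=
                if j - k < 2 then (0, ra.2)
                else match PySem.Dict.get? ra.2 (k, j) with
                     | some b => (b, ra.2)
                     | none => pvFB p fuel k j ra.2
              (pvBMin acc.1 (ra.1 + rb.1), rb.2)) (b, d)).2 := by
        intro l
        induction l with
        | nil => exact fun _ b d hd => ⟨rfl, hd⟩
        | cons k ks ihl =>
          intro hbound b d hd
          obtain ⟨hk1, hk2⟩ := hbound k (by simp)
          -- the a-value and the memo after it
          have hra : ∀ ra : Int × PySem.Dict (Nat × Nat) Int,
              ra = (if k - i < 2 then ((0 : Int), d)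
                else match PySem.Dict.get? d (i, k) with
                     | some a => (a, d)
                     | none => pvFB p fuel i k d) →
              ra.1 = pvF p fuel i k ∧ pvGood p ra.2 := by
            intro ra hra
            by_cases hki : k - i < 2
            · rw [hra, if_pos hki]
              exact ⟨(pvF_zero p fuel i k (by omega)).symm, hd⟩
            · rw [hra, if_neg hki]
              cases hg : PySem.Dict.get? d (i, k) with
              | some a =>
                refine ⟨?_, hd⟩
                rw [hd i k a hg]
                exact pvF_fuel p (k - i) fuel i k (by omega) (by omega)
              | none =>
                have h1 := ih i k d (by omega) (by omega) hd
                refine ⟨?_, h1.2⟩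
                rw [h1.1]
                exact pvF_fuel p (k - i) fuel i k (by omega) (by omega)
          obtain ⟨ha1, ha2⟩ := hra _ rfl
          -- the b-value and the memo after it
          have hrb : ∀ (d' : PySem.Dict (Nat × Nat) Int), pvGood p d' →
              ∀ rb : Int × PySem.Dict (Nat × Nat) Int,
              rb = (if j - k < 2 then ((0 : Int), d')
                else match PySem.Dict.get? d' (k, j) with
                     | some b' => (b', d')
                     | none => pvFB p fuel k j d') →
              rb.1 = pvF p fuel k j ∧ pvGood p rb.2 := by
            intro d' hd' rb hrb
            by_cases hjk : j - k < 2
            · rw [hrb, if_pos hjk]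
              exact ⟨(pvF_zero p fuel k j (by omega)).symm, hd'⟩
            · rw [hrb, if_neg hjk]
              cases hg : PySem.Dict.get? d' (k, j) with
              | some b' =>
                refine ⟨?_, hd'⟩
                rw [hd' k j b' hg]
                exact pvF_fuel p (j - k) fuel k j (by omega) (by omega)
              | none =>
                have h2 := ih k j d' (by omega) (by omega) hd'
                refine ⟨?_, h2.2⟩
                rw [h2.1]
                exact pvF_fuel p (j - k) fuel k j (by omega) (by omega)
          obtain ⟨hb1, hb2⟩ := hrb _ ha2 _ rfl
          simp only [List.foldl_cons]
          rw [ha1, hb1, pvBMin_eq_pvOMin]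
          exact ihl (fun k hk => hbound k (by simp [hk]))
            (pvOMin b (pvF p fuel i k + pvF p fuel k j)) _ hb2
      have hrange : ∀ k ∈ List.range' (i+1) (j - (i+1)), i + 1 ≤ k ∧ k < j := by
        intro k hk
        obtain ⟨a, b⟩ := List.mem_range'_1.mp hk
        omega
      obtain ⟨hval, hgood'⟩ := hfold _ hrange none memo hgood
      -- the pure fold equals the one inside pvF p (j - i) i j
      obtain ⟨w, hw⟩ : ∃ w, j - i = w + 1 := ⟨j - i - 1, by omega⟩
      have hpf : pvF p (j - i) i j
          = ((List.range' (i+1) (j - (i+1))).foldl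
              (fun b k => pvOMin b (pvF p fuel i k + pvF p fuel k j)) none).getD 0
            + p.getD j 0 - p.getD i 0 := by
        rw [hw]
        simp only [pvF, if_neg (show ¬ j < i + 2 by omega)]
        have hfold2 : (List.range' (i+1) (j - (i+1))).foldl
            (fun b k => pvOMin b (pvF p w i k + pvF p w k j)) none
            = (List.range' (i+1) (j - (i+1))).foldl
            (fun b k => pvOMin b (pvF p fuel i k + pvF p fuel k j)) none := by
          apply PySem.List.foldl_congr_mem
          intro acc k hk
          obtain ⟨hk1, hk2⟩ := hrange k hk
          rw [pvF_fuel p w fuel i k (by omega) (by omega),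
              pvF_fuel p w fuel k j (by omega) (by omega)]
        rw [hfold2]
      constructor
      · rw [hval, hpf]
      · intro i' j' v hg
        rw [PySem.Dict.get?_insert] at hg
        by_cases hpair : (i', j') = (i, j)
        · rw [if_pos hpair] at hg
          obtain ⟨hi', hj'⟩ := Prod.mk.injEq .. ▸ hpair
          subst hi'; subst hj'
          cases hg
          rw [hval, hpf]
        · rw [if_neg hpair] at hg
          exact hgood' i' j' v hg

-- ===== A-side: the table fill computes pvF =====
theorem pvGet2_replicate (m i j : Nat) : pvGet2 (List.replicate m (List.replicate m 0)) i j = 0 := by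
  by_cases h : i < m <;> by_cases h2 : j < m <;>
    simp [pvGet2, List.getD_eq_getElem?_getD, List.getElem?_replicate, h, h2]

theorem pvRow_set2 (dp : List (List Int)) (i j i' : Nat) (v : Int) :
    (pvSet2 dp i j v).getD i' [] = if i' = i then (dp.getD i []).set j v else dp.getD i' [] := by
  unfold pvSet2
  by_cases h : i' = i
  · subst h
    by_cases hlen : i' < dp.length
    · simp [List.getD_eq_getElem?_getD, List.getElem?_set, hlen]
    · simp [List.getD_eq_getElem?_getD, List.getElem?_set, hlen,
        List.getElem?_eq_none (le_of_not_gt hlen)]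
  · simp [List.getD_eq_getElem?_getD, List.getElem?_set, Ne.symm h, h]

theorem pvGet2_set2 (dp : List (List Int)) (i j i' j' : Nat) (v : Int)
    (hj : j < (dp.getD i []).length) :
    pvGet2 (pvSet2 dp i j v) i' j' = if i' = i ∧ j' = j then v else pvGet2 dp i' j' := by
  unfold pvGet2
  rw [pvRow_set2]
  by_cases h : i' = i
  · subst h
    simp only [if_pos rfl]
    by_cases h2 : j' = j
    · subst h2
      rw [List.getD_eq_getElem?_getD] at hj ⊢
      simp [List.getElem?_set, hj]
    · simp [List.getD_eq_getElem?_getD, List.getElem?_set, Ne.symm h2, h2]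
  · simp [h]

theorem pvLen_set2 (dp : List (List Int)) (i j : Nat) (v : Int) :
    (pvSet2 dp i j v).length = dp.length := by
  simp [pvSet2]

-- table invariant: widths up to l are filled with pvF, everything else is 0
def pvTOK (p : List Int) (m l : Nat) (dp : List (List Int)) : Prop :=
  dp.length = m ∧ (∀ i, i < m → (dp.getD i []).length = m) ∧
  ∀ i j, pvGet2 dp i j = if i < m ∧ j < m ∧ j ≤ i + l then pvF p (j - i) i j else 0

-- inner invariant: diagonal l is additionally filled for rows below t
def pvIOK (p : List Int) (m l t : Nat) (dp : List (List Int)) : Prop :=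
  dp.length = m ∧ (∀ i, i < m → (dp.getD i []).length = m) ∧
  ∀ i j, pvGet2 dp i j
    = if i < m ∧ j < m ∧ (j ≤ i + (l-1) ∨ (j = i + l ∧ i < t)) then pvF p (j - i) i j else 0

theorem pvTOK_init (p : List Int) (m : Nat) :
    pvTOK p m 1 (List.replicate m (List.replicate m 0)) := by
  refine ⟨by simp, fun i hi => by simp [List.getD_eq_getElem?_getD, List.getElem?_replicate, hi], ?_⟩
  intro i j
  rw [pvGet2_replicate]
  split_ifs with h
  · exact (pvF_zero p _ i j (by omega)).symm
  · rfl

theorem pvInner_step (p : List Int) (m l t : Nat) (dp : List (List Int))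
    (h2 : 2 ≤ l) (ht : t < m - l) (hok : pvIOK p m l t dp) :
    pvIOK p m l (t+1) (pvInner p l dp t) := by
  obtain ⟨hlen, hrow, hval⟩ := hok
  have htm : t < m := by omega
  have hjm : t + l < m := by omega
  -- the value computed for dp[t][t+l]
  have hbest : ((List.range' (t+1) ((t+l) - (t+1))).foldl
      (fun b k => pvOMin b (pvGet2 dp t k + pvGet2 dp k (t+l) + p.getD (t+l) 0 - p.getD t 0)) none).getD 0
      = pvF p l t (t + l) := by
    obtain ⟨w, rfl⟩ : ∃ w, l = w + 2 := ⟨l - 2, by omega⟩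
    have hcongr : (List.range' (t+1) ((t+(w+2)) - (t+1))).foldl
        (fun b k => pvOMin b (pvGet2 dp t k + pvGet2 dp k (t+(w+2)) + p.getD (t+(w+2)) 0 - p.getD t 0)) none
        = (List.range' (t+1) ((t+(w+2)) - (t+1))).foldl
        (fun b k => pvOMin b ((pvF p (w+1) t k + pvF p (w+1) k (t+(w+2))) + (p.getD (t+(w+2)) 0 - p.getD t 0))) none := by
      apply PySem.List.foldl_congr_mem
      intro acc k hk
      obtain ⟨hk1, hk2⟩ := List.mem_range'_1.mp hk
      have hv1 : pvGet2 dp t k = pvF p (w+1) t k := by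
        rw [hval t k, if_pos (by omega)]
        exact pvF_fuel p (k - t) (w+1) t k (by omega) (by omega)
      have hv2 : pvGet2 dp k (t+(w+2)) = pvF p (w+1) k (t+(w+2)) := by
        rw [hval k (t+(w+2)), if_pos (by omega)]
        exact pvF_fuel p ((t+(w+2)) - k) (w+1) k (t+(w+2)) (by omega) (by omega)
      rw [hv1, hv2]
      congr 1
      ring
    rw [hcongr]
    have hmap := pvOMin_add (List.range' (t+1) ((t+(w+2)) - (t+1)))
      (fun k => pvF p (w+1) t k + pvF p (w+1) k (t+(w+2))) (p.getD (t+(w+2)) 0 - p.getD t 0) none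
    simp only [Option.map_none] at hmap
    rw [hmap]
    have hpvf : pvF p (w+2) t (t+(w+2))
        = ((List.range' (t+1) ((t+(w+2)) - (t+1))).foldl
            (fun b k => pvOMin b (pvF p (w+1) t k + pvF p (w+1) k (t+(w+2)))) none).getD 0
          + p.getD (t+(w+2)) 0 - p.getD t 0 := by
      simp only [pvF, if_neg (show ¬ t + (w+2) < t + 2 by omega)]
    rw [hpvf]
    obtain ⟨c, hc⟩ : ∃ c, (t+(w+2)) - (t+1) = c + 1 := ⟨w, by omega⟩
    rw [hc, List.range'_succ]
    obtain ⟨u, hu⟩ := pvOMin_cons_some (t+1) (List.range' (t+1+1) c)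
      (fun k => pvF p (w+1) t k + pvF p (w+1) k (t+(w+2)))
    rw [hu]
    simp only [Option.map_some, Option.getD_some]
    ring
  -- the table update
  unfold pvInner
  simp only []
  refine ⟨by rw [pvLen_set2, hlen], ?_, ?_⟩
  · intro i hi
    rw [pvRow_set2]
    split_ifs with h
    · subst h
      rw [List.length_set, hrow i hi]
    · exact hrow i hi
  · intro i j
    rw [pvGet2_set2 dp t (t+l) i j _ (by rw [hrow t htm]; omega)]
    rw [hbest]
    by_cases hcase : i = t ∧ j = t + l
    · obtain ⟨hi, hj⟩ := hcase
      subst hi; subst hj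
      rw [if_pos ⟨rfl, rfl⟩, if_pos (by omega)]
      have he : i + l - i = l := by omega
      rw [he]
    · rw [if_neg hcase, hval i j]
      by_cases h1 : i < m ∧ j < m ∧ (j ≤ i + (l-1) ∨ (j = i + l ∧ i < t))
      · rw [if_pos h1, if_pos (by omega)]
      · rw [if_neg h1, if_neg (by intro h; apply h1; refine ⟨h.1, h.2.1, ?_⟩; omega)]

theorem pvOuter_step (p : List Int) (m l : Nat) (hm : p.length = m)
    (h2 : 2 ≤ l) (hl : l ≤ m - 1) (dp : List (List Int))
    (hok : pvTOK p m (l-1) dp) : pvTOK p m l (pvOuter p dp l) := by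
  have hstep : ∀ t, t ≤ m - l → pvIOK p m l t ((List.range t).foldl (pvInner p l) dp) := by
    intro t
    induction t with
    | zero =>
      intro _
      simp only [List.range_zero, List.foldl_nil]
      obtain ⟨h1, h2', h3⟩ := hok
      refine ⟨h1, h2', ?_⟩
      intro i j
      rw [h3 i j]
      by_cases h : i < m ∧ j < m ∧ j ≤ i + (l-1)
      · rw [if_pos h, if_pos (by omega)]
      · rw [if_neg h, if_neg (by intro hc; exact h ⟨hc.1, hc.2.1, by omega⟩)]
    | succ t iht =>
      intro htle
      rw [List.range_succ, List.foldl_append, List.foldl_cons, List.foldl_nil]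
      exact pvInner_step p m l t _ h2 (by omega) (iht (by omega))
  have hfin := hstep (m - l) (le_refl _)
  unfold pvOuter
  rw [hm]
  obtain ⟨h1, h2', h3⟩ := hfin
  refine ⟨h1, h2', ?_⟩
  intro i j
  rw [h3 i j]
  by_cases h : i < m ∧ j < m ∧ j ≤ i + l
  · rw [if_pos (by obtain ⟨ha, hb, hc⟩ := h; exact ⟨ha, hb, by omega⟩), if_pos h]
  · rw [if_neg (by intro hc; exact h ⟨hc.1, hc.2.1, by omega⟩), if_neg h]

theorem pvA_table (p : List Int) (m : Nat) (hm : p.length = m) (h2 : 2 ≤ m) :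
    pvTOK p m (m-1) ((List.range' 2 (m - 2)).foldl (pvOuter p)
      (List.replicate m (List.replicate m 0))) := by
  have hgen : ∀ c, c ≤ m - 2 →
      pvTOK p m (c+1) ((List.range' 2 c).foldl (pvOuter p)
        (List.replicate m (List.replicate m 0))) := by
    intro c
    induction c with
    | zero => intro _; exact pvTOK_init p m
    | succ c ihc =>
      intro hle
      rw [List.range'_concat, List.foldl_append, List.foldl_cons, List.foldl_nil]
      have := pvOuter_step p m (2 + 1 * c) hm (by omega) (by omega) _
        (by have h := ihc (by omega); have he : c + 1 = 2 + 1 * c - 1 := by omega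
            rw [he] at h; exact h)
      have he2 : c + 1 + 1 = 2 + 1 * c := by omega
      rw [he2]
      exact this
  have := hgen (m - 2) (le_refl _)
  have he : m - 2 + 1 = m - 1 := by omega
  rw [he] at this
  exact this

-- ===== VERDICT (by name: the statement is the Claim_ definition above) =====
theorem min_split_spec : Claim_equal_min_split := by
  intro s parts _
  unfold Spec_min_split min_split min_split_alt
  simp only []
  set p : List Int := 0 :: (parts ++ [PySem.Str.len s]) with hp
  set m : Nat := p.length with hm
  have hm2 : 2 ≤ m := by simp [hm, hp]
  -- A computes pvF p (m-1) 0 (m-1)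
  obtain ⟨h1, h2, h3⟩ := pvA_table p m rfl hm2
  rw [h3 0 (m-1), if_pos (by omega)]
  by_cases hsmall : m - 1 < 2
  · rw [if_pos hsmall]
    exact pvF_zero p _ 0 (m-1) (by omega)
  · rw [if_neg hsmall]
    obtain ⟨hb, _⟩ := pvFB_spec p (m-1) 0 (m-1) PySem.Dict.empty (by omega) (by omega)
      (pvGood_empty p)
    rw [hb]
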